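-- pv_equiv track=rewrite | github.com/landturtler/2020_Algorithm | python/programmers/N으로표현.py | solution
-- ===== SOURCE A (Python) =====
-- def solution(N, number):
--     if N == number:
--         return 1
--
--     #dp[i] = N을 i번 사용해서 만들 수 있는 수를 저장하는 set
--     dp = []
--     dp.append(set()) # dp[0] 채움
--
--     for i in range(1, 9): #i = 1 ~ 8
--         number_set = set()
--         number_set.add(int(str(N) * i))
--
--         for j in range(1,i): #j = 1 ~ i-1
--             for op1 in dp[j]:
--                 for op2 in dp[i-j]:# i-j :
--                     number_set.add(op1 + op2)
--                     number_set.add(op1 - op2)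
--                     number_set.add(op1 * op2)
--                     if op2 != 0:
--                         number_set.add(op1 // op2)
--         if number in number_set:
--             return i
--
--         dp.append(number_set)
--
--     return -1
-- ===== SOURCE B (Python) =====
-- def solution(N, number):
--     if N == number:
--         return 1
--     cache = {}
--
--     def reach(i):
--         # set of values makeable using N exactly i times
--         s = cache.get(i)
--         if s is not None:
--             return s
--         s = {int(str(N) * i)}
--         for j in range(1, i):
--             ra = reach(j)
--             rb = reach(i - j)
--             for a in ra:
--                 for b in rb:
--                     s.add(a + b)
--                     s.add(a - b)
--                     s.add(a * b)
--                     if b != 0: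
--                         s.add(a // b)
--         cache[i] = s
--         return s
--
--     for i in range(1, 9):
--         if number in reach(i):
--             return i
--     return -1
-- ===== Notes on version B (the rewrite author's own statement) =====
-- stated objective: alternative
-- what changed: Replaces A's bottom-up dp list of sets (appending each level into a growing list indexed inside triple nested loops) by a top-down memoized recursion reach(i) that computes each level on demand from recursive calls; Pre_ excludes N < 0 with N != number, where both programs raise ValueError on int(str(N)*i) for i >= 2.
import Mathlib
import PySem

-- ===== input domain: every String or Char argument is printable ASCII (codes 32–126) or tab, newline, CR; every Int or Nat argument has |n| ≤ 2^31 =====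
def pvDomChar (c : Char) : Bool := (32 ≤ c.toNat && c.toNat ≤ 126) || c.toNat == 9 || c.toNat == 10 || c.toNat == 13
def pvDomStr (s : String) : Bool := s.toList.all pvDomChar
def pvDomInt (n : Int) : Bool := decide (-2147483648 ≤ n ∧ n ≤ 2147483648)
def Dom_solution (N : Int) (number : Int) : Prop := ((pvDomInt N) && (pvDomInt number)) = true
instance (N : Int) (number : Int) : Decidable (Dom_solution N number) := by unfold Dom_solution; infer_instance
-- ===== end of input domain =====

-- B rewrites A's bottom-up dp list of sets as a top-down memoized recursion reach(i); same cost (objective: alternative).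
-- Python's `set` is modelled by Std.TreeSet Int in BOTH ports: the returned Int depends only on set MEMBERSHIP
-- (Python's hash iteration order is unspecified and PySem does not model it), and the list-backed PySem.Set makes
-- these fixed-depth-8 set computations infeasible to evaluate.

-- ===== PORT A =====
-- int(str(N) * i): i copies of str(N) parsed back; `.getD 0` is never reached under Pre_
-- (for N ≥ 0 the string is plain digits; Pre_ excludes the N < 0 inputs where Python raises ValueError).
def pvRepNum (N : Int) (i : Nat) : Int :=
  (PySem.Int.ofChars? (List.replicate i (PySem.Int.toChars N)).flatten).getD 0

-- the two inner loops both Pythons share verbatim: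
-- for op1 in ra: for op2 in rb: add op1+op2, op1-op2, op1*op2, and op1//op2 when op2 != 0
def pvCombine (s ra rb : Std.TreeSet Int) : Std.TreeSet Int :=
  ra.foldl
    (fun s op1 =>
      rb.foldl
        (fun s op2 =>
          let s := ((s.insert (op1 + op2)).insert (op1 - op2)).insert (op1 * op2)
          if op2 ≠ 0 then s.insert (PySem.Int.floordiv op1 op2) else s)
        s)
    s

-- the body of A's outer iteration: number_set = set(); number_set.add(int(str(N)*i)); then the j loop
-- (dp[j] is total List.getD: the index is always in range since dp has length i at stage i).
def pvBuildA (N : Int) (dp : List (Std.TreeSet Int)) (i : Nat) : Std.TreeSet Int :=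
  (List.range' 1 (i - 1)).foldl
    (fun ns j => pvCombine ns (dp.getD j Std.TreeSet.empty) (dp.getD (i - j) Std.TreeSet.empty))
    (Std.TreeSet.empty.insert (pvRepNum N i))

-- `for i in range(1, 9)` with early return, carrying dp; `return -1` after the loop
def pvLoopA (N number : Int) (dp : List (Std.TreeSet Int)) (i : Nat) : Int :=
  if i ≥ 9 then -1
  else
    let ns := pvBuildA N dp i
    if ns.contains number then (i : Int)
    else pvLoopA N number (dp ++ [ns]) (i + 1)
  termination_by 9 - i

def solution (N : Int) (number : Int) : Int :=
  if N = number then 1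
  else pvLoopA N number [Std.TreeSet.empty] 1

-- ===== PORT B =====
-- reach(i) of Source B, with its memo dict `cache` threaded explicitly: returns (reach(i), updated cache)
def pvReachM (N : Int) : Nat → PySem.Dict Nat (Std.TreeSet Int) → Std.TreeSet Int × PySem.Dict Nat (Std.TreeSet Int)
  | i, c =>
    match PySem.Dict.get? c i with
    | some s => (s, c)
    | none =>
      let sc :=
        (List.range' 1 (i - 1)).attach.foldl
          (fun sc jh =>
            let rac := pvReachM N jh.1 sc.2
            let rbc := pvReachM N (i - jh.1) rac.2
            (pvCombine sc.1 rac.1 rbc.1, rbc.2))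
          (Std.TreeSet.empty.insert (pvRepNum N i), c)
      (sc.1, PySem.Dict.insert sc.2 i sc.1)
  termination_by i => i
  decreasing_by
    all_goals
      have hj := List.mem_range'_1.mp jh.2
      omega

-- `for i in range(1, 9): if number in reach(i): return i` / `return -1`, carrying the cache
def pvSearchB (N number : Int) (i : Nat) (c : PySem.Dict Nat (Std.TreeSet Int)) : Int :=
  if i ≥ 9 then -1
  else
    let rc := pvReachM N i c
    if rc.1.contains number then (i : Int)
    else pvSearchB N number (i + 1) rc.2
  termination_by 9 - i

def solution_alt (N : Int) (number : Int) : Int :=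
  if N = number then 1
  else pvSearchB N number 1 PySem.Dict.empty

-- ===== PRECONDITION & SPEC =====
-- Pre_ excludes N < 0 with N ≠ number: there Python A raises ValueError at i = 2 on int(str(N)*2)
-- (str(-3)*2 = '-3-3' is not an int literal); B raises the same way.
def Pre_solution (N : Int) (number : Int) : Prop := 0 ≤ N ∨ N = number
instance (N : Int) (number : Int) : Decidable (Pre_solution N number) := by unfold Pre_solution; infer_instance
def pvWitness_solution : Int × Int := (5, 12)

def Spec_solution (N : Int) (number : Int) (out : Int) : Prop := out = solution_alt N number
instance (N : Int) (number : Int) (out : Int) : Decidable (Spec_solution N number out) := by unfold Spec_solution; infer_instance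

-- ===== CLAIM (what is proved, stated in full; the proofs are below) =====
def Claim_equal_solution : Prop := ∀ (N : Int) (number : Int), Dom_solution N number → Pre_solution N number → Spec_solution N number (solution N number)

-- ===== LEMMAS AND PROOFS =====

-- proof-side pure version of B's reach(i) (no cache); used only in the lemmas below
def pvReachP (N : Int) : Nat → Std.TreeSet Int
  | i =>
    (List.range' 1 (i - 1)).attach.foldl
      (fun s jh => pvCombine s (pvReachP N jh.1) (pvReachP N (i - jh.1)))
      (Std.TreeSet.empty.insert (pvRepNum N i))
  termination_by i => i
  decreasing_by
    all_goals
      have hj := List.mem_range'_1.mp jh.2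
      omega

-- A's stage-i set equals pure reach i whenever dp holds reach at every earlier level
lemma pvBuildA_eq (N : Int) (i : Nat) (dp : List (Std.TreeSet Int))
    (h : ∀ j, 1 ≤ j → j < i → dp.getD j Std.TreeSet.empty = pvReachP N j) :
    pvBuildA N dp i = pvReachP N i := by
  rw [pvReachP, pvBuildA]
  rw [List.foldl_attach (l := List.range' 1 (i - 1)) (b := Std.TreeSet.empty.insert (pvRepNum N i))
    (f := fun s j => pvCombine s (pvReachP N j) (pvReachP N (i - j)))]
  apply PySem.List.foldl_congr_mem
  intro s j hj
  have hj' := List.mem_range'_1.mp hj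
  rw [h j (by omega) (by omega), h (i - j) (by omega) (by omega)]

-- a cache is good when every entry is the pure reach of its key
def pvGoodC (N : Int) (c : PySem.Dict Nat (Std.TreeSet Int)) : Prop :=
  ∀ j s, PySem.Dict.get? c j = some s → s = pvReachP N j

-- B's memoized reach returns the pure reach and keeps the cache good
lemma pvReachM_eq (N : Int) :
    ∀ i c, pvGoodC N c → ∃ c', pvReachM N i c = (pvReachP N i, c') ∧ pvGoodC N c' := by
  intro i
  induction i using Nat.strong_induction_on with
  | _ i ih =>
    intro c hc
    rw [pvReachM]
    cases hg : PySem.Dict.get? c i with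
    | some s =>
      refine ⟨c, ?_, hc⟩
      simp only [hc i s hg]
    | none =>
      have hfold : ∀ (l : List {x // x ∈ List.range' 1 (i - 1)}) (s : Std.TreeSet Int) c₀,
          pvGoodC N c₀ →
          ∃ c', (l.foldl
              (fun sc jh =>
                (pvCombine sc.1 (pvReachM N jh.1 sc.2).1
                   (pvReachM N (i - jh.1) (pvReachM N jh.1 sc.2).2).1,
                 (pvReachM N (i - jh.1) (pvReachM N jh.1 sc.2).2).2))
              (s, c₀)) =
            (l.foldl
              (fun s jh => pvCombine s (pvReachP N jh.1) (pvReachP N (i - jh.1)))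
              s, c') ∧ pvGoodC N c' := by
        intro l
        induction l with
        | nil => exact fun s c₀ hc₀ => ⟨c₀, rfl, hc₀⟩
        | cons jh l ihl =>
          intro s c₀ hc₀
          have hjm := List.mem_range'_1.mp jh.2
          obtain ⟨c₁, h₁, hg₁⟩ := ih jh.1 (by omega) c₀ hc₀
          obtain ⟨c₂, h₂, hg₂⟩ := ih (i - jh.1) (by omega) c₁ hg₁
          simp only [List.foldl_cons, h₁, h₂]
          exact ihl _ c₂ hg₂
      obtain ⟨c', hf, hg'⟩ := hfold (List.range' 1 (i - 1)).attach
        (Std.TreeSet.empty.insert (pvRepNum N i)) c hc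
      refine ⟨PySem.Dict.insert c' i (pvReachP N i), ?_, ?_⟩
      · rw [pvReachP]
        rw [hf]
      · intro j s hj
        rw [PySem.Dict.get?_insert] at hj
        split_ifs at hj with hji
        · cases hj; subst hji; rfl
        · exact hg' j s hj

-- A's remaining loop from stage i equals B's remaining search from stage i
lemma pvLoop_eq (N number : Int) :
    ∀ k i (dp : List (Std.TreeSet Int)) c, i + k = 9 → 1 ≤ i → dp.length = i →
    (∀ j, 1 ≤ j → j < i → dp.getD j Std.TreeSet.empty = pvReachP N j) →
    pvGoodC N c →
    pvLoopA N number dp i = pvSearchB N number i c := by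
  intro k
  induction k with
  | zero =>
    intro i dp c h9 _ _ _ _
    rw [pvLoopA, pvSearchB]
    simp [show i ≥ 9 by omega]
  | succ k ihk =>
    intro i dp c h9 h1 hlen hdp hc
    rw [pvLoopA, pvSearchB]
    have hlt : ¬ i ≥ 9 := by omega
    simp only [hlt, if_false]
    obtain ⟨c', hr, hg'⟩ := pvReachM_eq N i c hc
    rw [pvBuildA_eq N i dp hdp, hr]
    by_cases hcon : (pvReachP N i).contains number = true
    · rw [if_pos hcon, if_pos hcon]
    · simp only [Bool.not_eq_true] at hcon
      simp only [hcon, Bool.false_eq_true, if_false]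
      apply ihk (i + 1) (dp ++ [pvReachP N i]) c' (by omega) (by omega) (by simp [hlen]) _ hg'
      intro j hj1 hj2
      rcases Nat.lt_or_ge j i with hji | hji
      · rw [List.getD_append _ _ _ j (by omega), hdp j hj1 hji]
      · have hje : j = i := by omega
        subst hje
        rw [List.getD_append_right _ _ _ _ (by omega)]
        simp [hlen]

-- ===== VERDICT (by name: the statement is the Claim_ definition above) =====
theorem solution_spec : Claim_equal_solution := by
  intro N number _ _
  unfold Spec_solution solution solution_alt
  by_cases h : N = number
  · simp [h]
  · simp only [h, if_false]
    apply pvLoop_eq N number 8 1 [Std.TreeSet.empty] PySem.Dict.empty (by omega) (by omega) rfl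
    · intro j hj1 hj2
      omega
    · intro j s hj
      simp [PySem.Dict.get?, PySem.Dict.empty] at hj
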